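-- pv_equiv track=rewrite | github.com/pendulating/trawler | dagspaces/goldcoin_hipaa/stages/parse_responses.py | first_applicability_result
-- ===== SOURCE A (Python) =====
-- from typing import Optional
--
-- def first_applicability_result(response: str) -> Optional[str]:
--     """Find the first applicability keyword in the response."""
--     applicable_keywords = ["applicable", "apply to", "applies to"]
--     not_keywords = [" not "]
--     all_labels = applicable_keywords + not_keywords
--
--     first_index = len(response)
--     first_label = ""
--     for label in all_labels:
--         if label in response:
--             idx = response.index(label)
--             if idx < first_index:
--                 first_index = idx
--                 first_label = label
--
--     if first_label in applicable_keywords: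
--         return "Applicable"
--     elif first_label in not_keywords:
--         return "Not Applicable"
--     return None
-- ===== SOURCE B (Python) =====
-- from typing import Optional
--
-- _LABELS = ("applicable", "apply to", "applies to", " not ")
--
-- def first_applicability_result(response: str) -> Optional[str]:
--     """Single left-to-right scan: at each position try the four keywords in order."""
--     for i in range(len(response)):
--         for label in _LABELS:
--             if response.startswith(label, i):
--                 return "Not Applicable" if label == " not " else "Applicable"
--     return None
-- ===== Notes on version B (the rewrite author's own statement) =====
-- stated objective: alternative
-- what changed: B replaces A's four separate whole-string substring scans (`in` + `.index` per label) and min-index bookkeeping with a single left-to-right scan over positions that tries the four literal keywords in order at each position and returns on the first hit.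
import Mathlib
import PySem

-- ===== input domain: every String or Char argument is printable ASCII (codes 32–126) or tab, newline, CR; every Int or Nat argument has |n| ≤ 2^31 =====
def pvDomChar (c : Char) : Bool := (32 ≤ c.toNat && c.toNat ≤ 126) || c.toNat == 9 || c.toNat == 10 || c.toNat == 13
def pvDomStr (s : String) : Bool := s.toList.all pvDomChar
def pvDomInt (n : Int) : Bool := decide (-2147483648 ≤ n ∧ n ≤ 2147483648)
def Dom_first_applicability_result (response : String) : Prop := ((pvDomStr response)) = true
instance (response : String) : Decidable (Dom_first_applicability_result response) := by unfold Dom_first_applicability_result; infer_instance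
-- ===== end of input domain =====

-- B replaces A's four whole-string `in`/`.index` scans plus min-index bookkeeping by ONE
-- left-to-right scan over positions, trying the four literal keywords in order at each
-- position (objective: alternative, same asymptotic cost).

-- ===== PORT A =====
-- literal transliteration: fold over the label list carrying (first_index, first_label)
def first_applicability_result (response : String) : Option String :=
  let applicable_keywords : List String := ["applicable", "apply to", "applies to"]
  let not_keywords : List String := [" not "]
  let all_labels := applicable_keywords ++ not_keywords
  let st := all_labels.foldl (fun (st : Int × String) label =>
      if PySem.Str.isIn label response then
        let idx := PySem.Str.find response label
        if idx < st.1 then (idx, label) else st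
      else st) ((PySem.Str.len response : Int), "")
  if applicable_keywords.contains st.2 then some "Applicable"
  else if not_keywords.contains st.2 then some "Not Applicable"
  else none

-- ===== PORT B =====
-- B's scan: at each position (left to right) try the four keywords in order;
-- `response.startswith(label, i)` is a prefix test on the i-th tail.
def pvScanB : List Char → Option String
  | [] => none
  | c :: t =>
      if ("applicable".toList).isPrefixOf (c :: t) then some "Applicable"
      else if ("apply to".toList).isPrefixOf (c :: t) then some "Applicable"
      else if ("applies to".toList).isPrefixOf (c :: t) then some "Applicable"
      else if (" not ".toList).isPrefixOf (c :: t) then some "Not Applicable"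
      else pvScanB t

def first_applicability_result_alt (response : String) : Option String :=
  pvScanB response.toList

-- ===== PRECONDITION & SPEC =====
def Spec_first_applicability_result (response : String) (out : Option String) : Prop := out = first_applicability_result_alt response
instance (response : String) (out : Option String) : Decidable (Spec_first_applicability_result response out) := by unfold Spec_first_applicability_result; infer_instance

-- ===== CLAIM (what is proved, stated in full; the proofs are below) =====
def Claim_equal_first_applicability_result : Prop := ∀ (response : String), Dom_first_applicability_result response → Spec_first_applicability_result response (first_applicability_result response)

-- ===== LEMMAS AND PROOFS =====

-- the fold step of A, list-side
def pvStep (l : List Char) (st : Int × String) (label : String) : Int × String :=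
  if PySem.Chars.isIn label.toList l then
    if PySem.Chars.find l label.toList < st.1 then (PySem.Chars.find l label.toList, label) else st
  else st

-- list-side mirror of A's body (same fold over the same labels, same final test)
def pvAstep (l : List Char) : Option String :=
  let st := (["applicable", "apply to", "applies to", " not "] : List String).foldl
      (pvStep l) ((l.length : Int), "")
  if (["applicable", "apply to", "applies to"] : List String).contains st.2 then some "Applicable"
  else if ([" not "] : List String).contains st.2 then some "Not Applicable"
  else none

theorem pvA_eq (s : String) : first_applicability_result s = pvAstep s.toList := by
  simp [first_applicability_result, pvAstep, pvStep]

theorem pv_find_nonneg (l lab : List Char) (h : PySem.Chars.isIn lab l = true) :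
    0 ≤ PySem.Chars.find l lab := by
  rw [PySem.Chars.find_nonneg_iff]; exact (PySem.Chars.isIn_iff_infix lab l).1 h

theorem pv_isIn_of_prefix (l lab : List Char) (h : lab <+: l) : PySem.Chars.isIn lab l = true := by
  rw [PySem.Chars.isIn_iff_infix]; exact h.isInfix

theorem pv_find_eq_zero (l lab : List Char) (h : lab <+: l) : PySem.Chars.find l lab = 0 := by
  have h0 := pv_find_nonneg l lab (pv_isIn_of_prefix l lab h)
  have hs := PySem.Chars.find_spec h0
  by_contra hne
  have : (0:Nat) < (PySem.Chars.find l lab).toNat := by omega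
  exact hs.2 0 this (by simpa using h)

theorem pv_one_le_find (l lab : List Char) (hin : PySem.Chars.isIn lab l = true)
    (h : ¬ lab <+: l) : 1 ≤ PySem.Chars.find l lab := by
  have h0 := pv_find_nonneg l lab hin
  have hs := PySem.Chars.find_spec h0
  by_contra hlt
  have hz : PySem.Chars.find l lab = 0 := by omega
  rw [hz] at hs
  exact h (by simpa using hs.1)

theorem pv_find_unique (l lab : List Char) (k : Int) (hk : 0 ≤ k)
    (h1 : lab <+: l.drop k.toNat) (h2 : ∀ i < k.toNat, ¬ lab <+: l.drop i) :
    PySem.Chars.find l lab = k := by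
  have hin : PySem.Chars.isIn lab l = true := by
    rw [PySem.Chars.isIn_iff_infix]
    exact h1.isInfix.trans (List.drop_suffix _ _).isInfix
  have h0 := pv_find_nonneg l lab hin
  have hs := PySem.Chars.find_spec h0
  rcases lt_trichotomy (PySem.Chars.find l lab) k with h | h | h
  · exact absurd hs.1 (h2 _ (by omega))
  · exact h
  · exact absurd h1 (hs.2 k.toNat (by omega))

theorem pv_isIn_cons (c : Char) (t lab : List Char) (h : ¬ lab <+: (c :: t)) :
    PySem.Chars.isIn lab (c :: t) = PySem.Chars.isIn lab t := by
  cases hb : PySem.Chars.isIn lab t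
  · rw [PySem.Chars.isIn_eq_false_iff] at hb ⊢
    rw [List.infix_cons_iff]
    tauto
  · rw [PySem.Chars.isIn_iff_infix] at hb ⊢
    rw [List.infix_cons_iff]
    exact Or.inr hb

theorem pv_find_cons (c : Char) (t lab : List Char) (h : ¬ lab <+: (c :: t))
    (hin : PySem.Chars.isIn lab t = true) :
    PySem.Chars.find (c :: t) lab = PySem.Chars.find t lab + 1 := by
  have h0 := pv_find_nonneg t lab hin
  have hs := PySem.Chars.find_spec h0
  apply pv_find_unique _ _ _ (by omega)
  · have he : (PySem.Chars.find t lab + 1).toNat = (PySem.Chars.find t lab).toNat + 1 := by omega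
    rw [he, List.drop_succ_cons]
    exact hs.1
  · intro i hi
    cases i with
    | zero => simpa using h
    | succ j =>
        rw [List.drop_succ_cons]
        exact hs.2 j (by omega)

-- one fold step never lowers a positive index below 1 when every applicable label occurs late
theorem pv_step_pos (l : List Char) (p : String) (st : Int × String) (h : 1 ≤ st.1)
    (hg : PySem.Chars.isIn p.toList l = true → 1 ≤ PySem.Chars.find l p.toList) :
    1 ≤ (pvStep l st p).1 := by
  simp only [pvStep]
  split_ifs with hin hlt
  · exact hg hin
  · exact h
  · exact h

theorem pv_fold_pos (l : List Char) :
    ∀ (pre : List String) (st : Int × String), 1 ≤ st.1 →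
      (∀ p ∈ pre, PySem.Chars.isIn p.toList l = true → 1 ≤ PySem.Chars.find l p.toList) →
      1 ≤ (pre.foldl (pvStep l) st).1 := by
  intro pre
  induction pre with
  | nil => intro st h _; simpa using h
  | cons p rest ih =>
      intro st h hp
      rw [List.foldl_cons]
      exact ih _ (pv_step_pos l p st h (hp p (by simp))) (fun q hq => hp q (by simp [hq]))

theorem pv_step_stay (l : List Char) (p : String) (st : Int × String) (h : st.1 ≤ 0) :
    pvStep l st p = st := by
  simp only [pvStep]
  split_ifs with hin hlt
  · exact absurd hlt (by have := pv_find_nonneg l p.toList hin; omega)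
  · rfl
  · rfl

theorem pv_fold_stay (l : List Char) :
    ∀ (post : List String) (st : Int × String), st.1 ≤ 0 → post.foldl (pvStep l) st = st := by
  intro post
  induction post with
  | nil => intro st _; rfl
  | cons p rest ih =>
      intro st h
      rw [List.foldl_cons, pv_step_stay l p st h]
      exact ih st h

-- the first label (in list order) that is a prefix of l wins A's fold
theorem pv_fold_prefix (l : List Char) (pre post : List String) (lab : String)
    (hpre : ∀ p ∈ pre, PySem.Chars.isIn p.toList l = true → 1 ≤ PySem.Chars.find l p.toList)
    (hlab : lab.toList <+: l) (hlen : 1 ≤ (l.length : Int)) :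
    ((pre ++ lab :: post).foldl (pvStep l) ((l.length : Int), "")).2 = lab := by
  rw [List.foldl_append, List.foldl_cons]
  have hpos := pv_fold_pos l pre ((l.length : Int), "") hlen hpre
  have hstep : pvStep l (pre.foldl (pvStep l) ((l.length : Int), "")) lab = (0, lab) := by
    simp only [pvStep, pv_isIn_of_prefix l lab.toList hlab, pv_find_eq_zero l lab.toList hlab]
    rw [if_pos (lt_of_lt_of_le zero_lt_one hpos)]
    simp
  rw [hstep, pv_fold_stay l post (0, lab) (by norm_num)]

theorem pv_fold_shift (c : Char) (t : List Char) :
    ∀ (labs : List String) (a : Int) (s : String),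
      (∀ lab ∈ labs, ¬ lab.toList <+: (c :: t)) →
      labs.foldl (pvStep (c :: t)) (a + 1, s) =
        ((labs.foldl (pvStep t) (a, s)).1 + 1, (labs.foldl (pvStep t) (a, s)).2) := by
  intro labs
  induction labs with
  | nil => intro a s _; simp
  | cons lab rest ih =>
      intro a s h
      have hnp : ¬ lab.toList <+: (c :: t) := h lab (by simp)
      have hrest : ∀ l ∈ rest, ¬ l.toList <+: (c :: t) := fun l hl => h l (by simp [hl])
      have hstep : pvStep (c :: t) (a + 1, s) lab =
          ((pvStep t (a, s) lab).1 + 1, (pvStep t (a, s) lab).2) := by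
        simp only [pvStep, pv_isIn_cons c t lab.toList hnp]
        cases hin : PySem.Chars.isIn lab.toList t
        · simp
        · rw [pv_find_cons c t lab.toList hnp hin]
          by_cases hlt : PySem.Chars.find t lab.toList < a
          · have hlt' : PySem.Chars.find t lab.toList + 1 < a + 1 := by omega
            simp [hlt, hlt']
          · have hlt' : ¬ PySem.Chars.find t lab.toList + 1 < a + 1 := by omega
            simp [hlt, hlt']
      rw [List.foldl_cons, List.foldl_cons, hstep]
      exact ih _ _ hrest

set_option maxHeartbeats 1600000 in
theorem pv_main : ∀ l : List Char, pvAstep l = pvScanB l := by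
  intro l
  induction l with
  | nil => decide
  | cons c t ih =>
      have hlen : 1 ≤ (((c :: t).length : Nat) : Int) := by
        simp only [List.length_cons]; push_cast; omega
      have hprefix_one : ∀ lab : List Char, ¬ lab <+: (c :: t) →
          PySem.Chars.isIn lab (c :: t) = true → 1 ≤ PySem.Chars.find (c :: t) lab :=
        fun lab h hin => pv_one_le_find _ _ hin h
      by_cases h1 : "applicable".toList <+: (c :: t)
      · have hst : (((["applicable", "apply to", "applies to", " not "] : List String)).foldl
            (pvStep (c :: t)) (((c :: t).length : Int), "")).2 = "applicable" :=
          pv_fold_prefix (c :: t) [] ["apply to", "applies to", " not "] "applicable"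
            (by intro p hp; simp at hp) h1 hlen
        have hb1 : "applicable".toList.isPrefixOf (c :: t) = true :=
          (List.isPrefixOf_iff_prefix).2 h1
        simp only [pvAstep, pvScanB]
        rw [hst, hb1]
        simp
      · have hb1 : "applicable".toList.isPrefixOf (c :: t) = false :=
          Bool.eq_false_iff.2 (fun hx => h1 ((List.isPrefixOf_iff_prefix).1 hx))
        by_cases h2 : "apply to".toList <+: (c :: t)
        · have hst : (((["applicable", "apply to", "applies to", " not "] : List String)).foldl
              (pvStep (c :: t)) (((c :: t).length : Int), "")).2 = "apply to" :=
            pv_fold_prefix (c :: t) ["applicable"] ["applies to", " not "] "apply to"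
              (by intro p hp; fin_cases hp; exact hprefix_one _ h1) h2 hlen
          have hb2 : "apply to".toList.isPrefixOf (c :: t) = true :=
            (List.isPrefixOf_iff_prefix).2 h2
          simp only [pvAstep, pvScanB]
          rw [hst, hb1, hb2]
          simp
        · have hb2 : "apply to".toList.isPrefixOf (c :: t) = false :=
            Bool.eq_false_iff.2 (fun hx => h2 ((List.isPrefixOf_iff_prefix).1 hx))
          by_cases h3 : "applies to".toList <+: (c :: t)
          · have hst : (((["applicable", "apply to", "applies to", " not "] : List String)).foldl
                (pvStep (c :: t)) (((c :: t).length : Int), "")).2 = "applies to" :=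
              pv_fold_prefix (c :: t) ["applicable", "apply to"] [" not "] "applies to"
                (by intro p hp; fin_cases hp
                    · exact hprefix_one _ h1
                    · exact hprefix_one _ h2) h3 hlen
            have hb3 : "applies to".toList.isPrefixOf (c :: t) = true :=
              (List.isPrefixOf_iff_prefix).2 h3
            simp only [pvAstep, pvScanB]
            rw [hst, hb1, hb2, hb3]
            simp
          · have hb3 : "applies to".toList.isPrefixOf (c :: t) = false :=
              Bool.eq_false_iff.2 (fun hx => h3 ((List.isPrefixOf_iff_prefix).1 hx))
            by_cases h4 : " not ".toList <+: (c :: t)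
            · have hst : (((["applicable", "apply to", "applies to", " not "] : List String)).foldl
                  (pvStep (c :: t)) (((c :: t).length : Int), "")).2 = " not " :=
                pv_fold_prefix (c :: t) ["applicable", "apply to", "applies to"] [] " not "
                  (by intro p hp; fin_cases hp
                      · exact hprefix_one _ h1
                      · exact hprefix_one _ h2
                      · exact hprefix_one _ h3) h4 hlen
              have hb4 : " not ".toList.isPrefixOf (c :: t) = true :=
                (List.isPrefixOf_iff_prefix).2 h4
              simp only [pvAstep, pvScanB]
              rw [hst, hb1, hb2, hb3, hb4]
              simp
            · -- no keyword matches at position 0: both sides shift/recurse to t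
              have hb4 : " not ".toList.isPrefixOf (c :: t) = false :=
                Bool.eq_false_iff.2 (fun hx => h4 ((List.isPrefixOf_iff_prefix).1 hx))
              have hall : ∀ lab ∈ (["applicable", "apply to", "applies to", " not "] : List String),
                  ¬ lab.toList <+: (c :: t) := by
                intro lab hlab
                simp only [List.mem_cons, List.not_mem_nil, or_false] at hlab
                rcases hlab with rfl | rfl | rfl | rfl <;> assumption
              have hc : (((c :: t).length : Nat) : Int) = (t.length : Int) + 1 := by
                simp only [List.length_cons]; push_cast; ring
              simp only [pvAstep, pvScanB]
              rw [hc, pv_fold_shift c t _ (t.length : Int) "" hall, hb1, hb2, hb3, hb4, ← ih]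
              simp only [pvAstep]
              simp

-- ===== VERDICT (by name: the statement is the Claim_ definition above) =====
theorem first_applicability_result_spec : Claim_equal_first_applicability_result := by
  intro response _
  unfold Spec_first_applicability_result first_applicability_result_alt
  rw [pvA_eq, pv_main]
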